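-- pv_equiv track=rewrite | github.com/Yo0oN/CodingTestStudy | YoonJeong/007주차/문자열압축.py | solution
-- ===== SOURCE A (Python) =====
-- def solution(s):
--     answer = len(s)
--
--     for i in range(1, len(s) // 2 + 1) : # 길이가 홀수일 경우를 위해 +1
--         newSLen = 0
--         patternCount = 0
--         pattern = ''
--
--         for j in range(0, len(s), i) :
--             if pattern == '' : # 처음 시작이면 비교 안하고 넘어감, 문자열 길이에 확인된 문자 수 더함
--                 pattern = s[j : j + i]
--                 newSLen += len(s[j : j + i])
--
--             elif pattern != s[j : j + i] : # 패턴이 달라졌다면 새로운 패턴 시작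
--                 if patternCount > 0 : # 기존 패턴 중복이 여러번일경우 패턴 몇번인지 더함
--                     newSLen += len(str(patternCount + 1))
--                 pattern = s[j : j + i]
--                 newSLen += len(s[j : j + i])
--                 patternCount = 0
--
--             elif pattern == s[j : j + i] : # 이전 패턴과 이후 패턴이 같을 경우 patternCount++
--                 patternCount += 1
--
--         if patternCount > 0 : # 다 끝난 후 아직 더해지지 않은 패턴 중복이 있다면..
--             newSLen += len(str(patternCount + 1)) # 패턴 몇번인지 더함
--
--         if answer > newSLen :
--             answer = newSLen
--
--     return answer
-- ===== SOURCE B (Python) =====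
-- def _comp(s, i):
--     # compressed length of s at chunk width i: repeatedly peel off the whole
--     # run of the leading chunk, counting its repeats by direct slice comparison
--     total = 0
--     while s:
--         head = s[:i]
--         k = 1
--         while s[k * i:(k + 1) * i] == head:
--             k += 1
--         total += len(head) + (len(str(k)) if k > 1 else 0)
--         s = s[k * i:]
--     return total
--
-- def solution(s):
--     best = len(s)
--     for i in range(1, len(s) // 2 + 1):
--         best = min(best, _comp(s, i))
--     return best
-- ===== Notes on version B (the rewrite author's own statement) =====
-- stated objective: alternative
-- what changed: A's single interleaved index loop with pattern/count/length state is replaced by a recursive run-peeling scan: _comp slices off the entire run of the leading chunk (counted with a while over direct slice comparisons), adds that run's cost, and recurses on the untouched remainder.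
import Mathlib
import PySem

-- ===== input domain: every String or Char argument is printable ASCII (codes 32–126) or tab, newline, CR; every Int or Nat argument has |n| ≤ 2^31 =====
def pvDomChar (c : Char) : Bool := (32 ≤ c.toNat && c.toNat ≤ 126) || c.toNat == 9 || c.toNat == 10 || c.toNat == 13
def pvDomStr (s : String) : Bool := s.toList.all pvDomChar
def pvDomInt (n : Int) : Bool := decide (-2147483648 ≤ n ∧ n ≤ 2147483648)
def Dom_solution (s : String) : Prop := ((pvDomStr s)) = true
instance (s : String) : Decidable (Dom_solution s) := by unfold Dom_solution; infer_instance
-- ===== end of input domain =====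

-- B replaces A's single interleaved index loop with pattern/count state by a recursive
-- run-peeling scan: slice off the leading chunk's whole run, add its cost, recurse on the rest.
-- Objective: alternative decomposition (recursive consumption vs iterative state machine); same asymptotic cost.

-- ===== PORT A =====
def solution (s : String) : Int :=
  let cs := s.toList
  (PySem.List.pyRange 1 (PySem.Int.floordiv (PySem.Str.len s) 2 + 1) 1).foldl
    (fun answer i =>
      let st :=
        (PySem.List.pyRange 0 (PySem.Str.len s) i).foldl
          (fun (st : Int × Int × List Char) j =>
            let newSLen := st.1
            let patternCount := st.2.1
            let pattern := st.2.2
            let chunk := PySem.List.slice cs (some j) (some (j + i))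
            if pattern = ([] : List Char) then
              (newSLen + (chunk.length : Int), patternCount, chunk)
            else if pattern ≠ chunk then
              ((if patternCount > 0 then
                  newSLen + ((PySem.Int.toChars (patternCount + 1)).length : Int)
                else newSLen) + (chunk.length : Int), 0, chunk)
            else
              (newSLen, patternCount + 1, pattern))
          ((0 : Int), (0 : Int), ([] : List Char))
      let newSLen := st.1 + (if st.2.1 > 0 then ((PySem.Int.toChars (st.2.1 + 1)).length : Int) else 0)
      if answer > newSLen then newSLen else answer)
    (PySem.Str.len s)

-- ===== PORT B =====
-- the while loop 'k = 1; while s[k*i:(k+1)*i] == head: k += 1' of _comp, as the obvious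
-- recursion on the remainder (the '0 < i ∧ head ≠ []' conjuncts only make it total; the
-- caller always satisfies them)
def pvRun (head : List Char) (i : Nat) (rest : List Char) : Nat :=
  if h : 0 < i ∧ rest.take i = head ∧ head ≠ [] then 1 + pvRun head i (rest.drop i) else 0
  termination_by rest.length
  decreasing_by
    have hne : rest ≠ [] := by
      intro he
      rw [he] at h
      simp at h
    have : 0 < rest.length := List.length_pos_iff.2 hne
    simp only [List.length_drop]
    omega

-- the outer 'while s:' loop of _comp of Source B, state = the accumulated total and the rest of s
-- (the 'i = 0' disjunct only makes it total; the caller passes i ≥ 1)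
def pvComp (total : Int) (cs : List Char) (i : Nat) : Int :=
  if h : cs = [] ∨ i = 0 then total
  else
    let head := cs.take i
    let k := 1 + pvRun head i (cs.drop i)
    pvComp
      (total + ((head.length : Int) +
        (if k > 1 then ((PySem.Int.toChars (k : Int)).length : Int) else 0)))
      (cs.drop (k * i)) i
  termination_by cs.length
  decreasing_by
    have h1 : cs ≠ [] := fun he => h (Or.inl he)
    have h2 : i ≠ 0 := fun he => h (Or.inr he)
    have : 0 < cs.length := List.length_pos_iff.2 h1
    simp only [List.length_drop]
    have : 1 ≤ (1 + pvRun (cs.take i) i (cs.drop i)) * i := Nat.le_mul_of_pos_right _ (by omega) |>.trans (Nat.mul_le_mul_right i (by omega))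
    omega

def solution_alt (s : String) : Int :=
  let cs := s.toList
  (PySem.List.pyRange 1 (PySem.Int.floordiv (PySem.Str.len s) 2 + 1) 1).foldl
    (fun best i => min best (pvComp 0 cs i.toNat))
    (PySem.Str.len s)

-- ===== PRECONDITION & SPEC =====
def Spec_solution (s : String) (out : Int) : Prop := out = solution_alt s
instance (s : String) (out : Int) : Decidable (Spec_solution s out) := by unfold Spec_solution; infer_instance

-- ===== CLAIM (what is proved, stated in full; the proofs are below) =====
def Claim_equal_solution : Prop := ∀ (s : String), Dom_solution s → Spec_solution s (solution s)

-- ===== LEMMAS AND PROOFS =====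

-- A's inner-loop step, on the chunk itself
def pvStepA (st : Int × Int × List Char) (chunk : List Char) : Int × Int × List Char :=
  if st.2.2 = ([] : List Char) then
    (st.1 + (chunk.length : Int), st.2.1, chunk)
  else if st.2.2 ≠ chunk then
    ((if st.2.1 > 0 then st.1 + ((PySem.Int.toChars (st.2.1 + 1)).length : Int) else st.1)
       + (chunk.length : Int), 0, chunk)
  else
    (st.1, st.2.1 + 1, st.2.2)

-- A's finishing step
def pvFinA (st : Int × Int × List Char) : Int :=
  st.1 + (if st.2.1 > 0 then ((PySem.Int.toChars (st.2.1 + 1)).length : Int) else 0)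

-- cost of writing a run count k
def pvCost (k : Int) : Int := if k > 1 then ((PySem.Int.toChars k).length : Int) else 0

-- run-length encoding of a list (reference object of the proof)
def pvRle {α : Type} [BEq α] : List α → List (α × Nat)
  | [] => []
  | x :: xs =>
      (x, 1 + (xs.takeWhile (· == x)).length) :: pvRle (xs.dropWhile (· == x))
  termination_by l => l.length
  decreasing_by
    simp only [List.length_cons]
    exact Nat.lt_succ_of_le (List.length_dropWhile_le _ _)

-- total compressed cost of a chunk list
def pvTotalB (L : List (List Char)) : Int :=
  (pvRle L).foldl
    (fun t p =>
      t + (((p.1.length : Int)) +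
        (if p.2 > 1 then ((PySem.Int.toChars (p.2 : Int)).length : Int) else 0)))
    0

-- the chunk list [s[0:i], s[i:2i], ...] built structurally
def pvChunks (cs : List Char) (i : Nat) : List (List Char) :=
  if h : cs = [] ∨ i = 0 then [] else cs.take i :: pvChunks (cs.drop i) i
  termination_by cs.length
  decreasing_by
    have h1 : cs ≠ [] := fun he => h (Or.inl he)
    have h2 : i ≠ 0 := fun he => h (Or.inr he)
    have : 0 < cs.length := List.length_pos_iff.2 h1
    simp only [List.length_drop]
    omega

lemma pvTotalB_from (L : List (List Char)) (t : Int) :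
    (pvRle L).foldl
      (fun t p =>
        t + (((p.1.length : Int)) +
          (if p.2 > 1 then ((PySem.Int.toChars (p.2 : Int)).length : Int) else 0)))
      t = t + pvTotalB L := by
  unfold pvTotalB
  rw [PySem.List.foldl_add, PySem.List.foldl_add]
  ring

lemma pvTotalB_cons (x : List Char) (xs : List (List Char)) :
    pvTotalB (x :: xs) =
      (x.length : Int) + pvCost (1 + ((xs.takeWhile (· == x)).length : Int))
        + pvTotalB (xs.dropWhile (· == x)) := by
  show pvTotalB (x :: xs) = _
  unfold pvTotalB
  rw [pvRle]
  rw [List.foldl_cons, pvTotalB_from]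
  unfold pvCost
  push_cast
  split_ifs with h1 h2 h2
  all_goals first | omega | (unfold pvTotalB; ring_nf)

lemma pvMain (L : List (List Char)) :
    ∀ (acc c : Int) (p : List Char), (∀ y ∈ L, y ≠ []) → p ≠ [] → 0 ≤ c →
    pvFinA (L.foldl pvStepA (acc, c, p)) =
      acc + pvCost (c + 1 + ((L.takeWhile (· == p)).length : Int))
          + pvTotalB (L.dropWhile (· == p)) := by
  induction L with
  | nil =>
    intro acc c p _ hp hc
    simp only [List.foldl_nil, List.takeWhile_nil, List.dropWhile_nil]
    unfold pvFinA pvCost pvTotalB pvRle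
    simp only [List.length_nil, Nat.cast_zero, add_zero, List.foldl_nil]
    split_ifs with h1 h2 h2 <;> omega
  | cons x xs ih =>
    intro acc c p hL hp hc
    have hx : x ≠ [] := hL x (List.mem_cons_self)
    have hL' : ∀ y ∈ xs, y ≠ [] := fun y hy => hL y (List.mem_cons_of_mem _ hy)
    by_cases hxp : x = p
    · subst hxp
      rw [List.foldl_cons]
      have hstep : pvStepA (acc, c, x) x = (acc, c + 1, x) := by
        unfold pvStepA
        simp [hp]
      rw [hstep, ih acc (c + 1) x hL' hp (by omega)]
      rw [List.takeWhile_cons, List.dropWhile_cons]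
      simp only [BEq.rfl, if_pos, List.length_cons]
      congr 2
      push_cast
      ring_nf
    · rw [List.foldl_cons]
      have hstep : pvStepA (acc, c, p) x =
          ((if c > 0 then acc + ((PySem.Int.toChars (c + 1)).length : Int) else acc)
            + (x.length : Int), 0, x) := by
        unfold pvStepA
        have : p ≠ x := fun h => hxp h.symm
        simp [hp, this]
      rw [hstep]
      rw [ih _ 0 x hL' hx (by omega)]
      rw [List.takeWhile_cons, List.dropWhile_cons]
      have hbeq : (x == p) = false := by simp [hxp]
      simp only [hbeq, Bool.false_eq_true, if_false]
      rw [pvTotalB_cons]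
      simp only [List.length_nil, Nat.cast_zero]
      unfold pvCost
      split_ifs with h1 h2 h2 <;> push_cast <;> first | omega | ring_nf

lemma pvInner (L : List (List Char)) (h : ∀ x ∈ L, x ≠ []) :
    pvFinA (L.foldl pvStepA (0, 0, ([] : List Char))) = pvTotalB L := by
  cases L with
  | nil => simp [pvFinA, pvTotalB, pvRle]
  | cons x xs =>
    have hx : x ≠ [] := h x (List.mem_cons_self)
    have hL' : ∀ y ∈ xs, y ≠ [] := fun y hy => h y (List.mem_cons_of_mem _ hy)
    rw [List.foldl_cons]
    have hstep : pvStepA (0, 0, ([] : List Char)) x = ((x.length : Int), 0, x) := by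
      unfold pvStepA; simp
    rw [hstep, pvMain xs _ 0 x hL' hx le_rfl, pvTotalB_cons]
    unfold pvCost
    push_cast
    ring_nf

-- pvRun counts exactly the leading chunks equal to head
lemma pvRun_eq_takeWhile (head : List Char) (i : Nat) (hi : 0 < i) (hh : head ≠ [])
    (rest : List Char) :
    ((pvChunks rest i).takeWhile (· == head)).length = pvRun head i rest := by
  rw [pvChunks.eq_def, pvRun.eq_def]
  by_cases hr : rest = []
  · subst hr
    simp [hh]
  · rw [dif_neg (by simp [hr]; omega)]
    rw [List.takeWhile_cons]
    by_cases he : rest.take i = head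
    · rw [dif_pos ⟨hi, he, hh⟩]
      simp only [he, BEq.rfl, if_pos, List.length_cons]
      rw [pvRun_eq_takeWhile head i hi hh (rest.drop i)]
      omega
    · rw [dif_neg (by simp [he])]
      simp [he]
  termination_by rest.length
  decreasing_by
    have : 0 < rest.length := List.length_pos_iff.2 hr
    simp only [List.length_drop]
    omega

-- after the run, the remaining chunks are the chunks of the remaining string
lemma pvDropWhile_chunks (head : List Char) (i : Nat) (hi : 0 < i) (hh : head ≠ [])
    (rest : List Char) :
    (pvChunks rest i).dropWhile (· == head) = pvChunks (rest.drop (pvRun head i rest * i)) i := by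
  rw [pvChunks.eq_def, pvRun.eq_def]
  by_cases hr : rest = []
  · subst hr
    simp [hh, pvChunks]
  · rw [dif_neg (by simp [hr]; omega)]
    rw [List.dropWhile_cons]
    by_cases he : rest.take i = head
    · rw [dif_pos ⟨hi, he, hh⟩]
      simp only [he, BEq.rfl, if_pos]
      rw [pvDropWhile_chunks head i hi hh (rest.drop i)]
      rw [List.drop_drop]
      congr 1
      ring_nf
    · rw [dif_neg (by simp [he])]
      have hf : (rest.take i == head) = false := by simp [he]
      rw [hf]
      simp only [Bool.false_eq_true, if_false, Nat.zero_mul, List.drop_zero]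
      conv_rhs => rw [pvChunks.eq_def]
      rw [dif_neg (by simp [hr]; omega)]
  termination_by rest.length
  decreasing_by
    have : 0 < rest.length := List.length_pos_iff.2 hr
    simp only [List.length_drop]
    omega

-- B's run-peeling loop equals the accumulator plus the total cost of the chunk list
lemma pvComp_eq_totalB (cs : List Char) (i : Nat) (hi : 0 < i) (t : Int) :
    pvComp t cs i = t + pvTotalB (pvChunks cs i) := by
  rw [pvChunks.eq_def, pvComp.eq_def]
  by_cases hcs : cs = []
  · subst hcs
    simp [pvTotalB, pvRle]
  · rw [dif_neg (by simp [hcs]; omega), dif_neg (by simp [hcs]; omega)]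
    have hh : cs.take i ≠ [] := by
      simp [List.take_eq_nil_iff, hcs]
      omega
    rw [pvTotalB_cons]
    rw [pvRun_eq_takeWhile _ i hi hh, pvDropWhile_chunks _ i hi hh]
    rw [List.drop_drop]
    have harith : i + pvRun (cs.take i) i (cs.drop i) * i = (1 + pvRun (cs.take i) i (cs.drop i)) * i := by ring
    rw [harith]
    rw [pvComp_eq_totalB (cs.drop ((1 + pvRun (cs.take i) i (cs.drop i)) * i)) i hi]
    unfold pvCost
    push_cast
    split_ifs with h1 h2 h2 <;> omega
  termination_by cs.length
  decreasing_by
    have : 0 < cs.length := List.length_pos_iff.2 hcs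
    simp only [List.length_drop]
    have h1 : 1 ≤ (1 + pvRun (cs.take i) i (cs.drop i)) * i := by
      have := Nat.mul_le_mul (show 1 ≤ 1 + pvRun (cs.take i) i (cs.drop i) by omega) hi
      omega
    omega

-- pyRange with a positive step, peeled by one element
lemma pvRange_cons (n i : Int) (hi : 0 < i) (hn : 0 < n) :
    PySem.List.pyRange 0 n i = 0 :: (PySem.List.pyRange 0 (n - i) i).map (· + i) := by
  rw [PySem.List.pyRange_of_pos _ _ hi, PySem.List.pyRange_of_pos _ _ hi]
  have key : (n - 0 + i - 1) / i = (n - 1) / i + 1 := by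
    have : n - 0 + i - 1 = (n - 1) + 1 * i := by ring
    rw [this, Int.add_mul_ediv_right _ _ (by omega)]
  have hnn : 0 ≤ (n - 1) / i := Int.ediv_nonneg (by omega) (by omega)
  by_cases hlt : i < n
  · rw [if_pos hn, if_pos (by omega)]
    have h2 : (n - i - 0 + i - 1) / i = (n - 1) / i := by congr 1; ring
    rw [key, h2]
    have h3 : ((n - 1) / i + 1).toNat = ((n - 1) / i).toNat + 1 := by omega
    rw [h3, List.range_succ_eq_map]
    simp only [List.map_cons, List.map_map]
    congr 1
    · simp
    · apply List.map_congr_left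
      intro k _
      simp only [Function.comp]
      push_cast
      ring
  · rw [if_pos hn, if_neg (by omega)]
    have h0 : (n - 1) / i = 0 := Int.ediv_eq_zero_of_lt (by omega) (by omega)
    rw [key, h0]
    simp

lemma pvRange_chunks (cs : List Char) (i : Int) (hi : 1 ≤ i) :
    (PySem.List.pyRange 0 (cs.length : Int) i).map
      (fun j => PySem.List.slice cs (some j) (some (j + i))) = pvChunks cs i.toNat := by
  by_cases hcs : cs = []
  · subst hcs
    rw [pvChunks.eq_def]
    simp [PySem.List.pyRange_of_pos _ _ (show (0:Int) < i by omega)]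
  · have hn : 0 < (cs.length : Int) := by
      have : 0 < cs.length := List.length_pos_iff.2 hcs
      omega
    rw [pvRange_cons _ _ (by omega) hn, List.map_cons, List.map_map]
    rw [pvChunks.eq_def, dif_neg (by simp [hcs]; omega)]
    congr 1
    · have h0 : (0 : Int) + i = i := by ring
      rw [h0]
      simp only [PySem.List.slice_zero_start]
      rw [PySem.List.slice_to _ (by omega)]
    · have hpt : ∀ j ∈ PySem.List.pyRange 0 ((cs.length : Int) - i) i,
          ((fun j => PySem.List.slice cs (some j) (some (j + i))) ∘ (· + i)) j
            = PySem.List.slice (cs.drop i.toNat) (some j) (some (j + i)) := by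
        intro j hj
        have hj0 : 0 ≤ j := ((PySem.List.mem_pyRange_iff_of_pos (by omega) j).1 hj).1
        simp only [Function.comp]
        rw [PySem.List.slice_toNat _ (by omega) (by omega),
            PySem.List.slice_toNat _ (by omega) (by omega), List.drop_drop]
        congr 1
        · omega
        · congr 1
          omega
      rw [List.map_congr_left hpt]
      by_cases hle : i ≤ (cs.length : Int)
      · have hlen : ((cs.drop i.toNat).length : Int) = (cs.length : Int) - i := by
          simp only [List.length_drop]
          omega
        rw [← hlen, pvRange_chunks (cs.drop i.toNat) i hi]
      · have h1 : PySem.List.pyRange 0 ((cs.length : Int) - i) i = [] := by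
          rw [PySem.List.pyRange_of_pos _ _ (show (0:Int) < i by omega), if_neg (by omega)]
          simp
        have h2 : cs.drop i.toNat = [] := by
          apply List.drop_eq_nil_of_le
          omega
        rw [h1, h2, pvChunks.eq_def]
        simp
  termination_by cs.length
  decreasing_by
    have : 0 < cs.length := List.length_pos_iff.2 hcs
    simp only [List.length_drop]
    omega

lemma pvBody (cs : List Char) (n acc i : Int) (h1 : 1 ≤ i) (hn : n = (cs.length : Int)) :
    (if acc > pvFinA ((PySem.List.pyRange 0 n i).foldl
        (fun st j => pvStepA st (PySem.List.slice cs (some j) (some (j + i))))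
        (0, 0, ([] : List Char)))
     then pvFinA ((PySem.List.pyRange 0 n i).foldl
        (fun st j => pvStepA st (PySem.List.slice cs (some j) (some (j + i))))
        (0, 0, ([] : List Char)))
     else acc)
    = min acc (pvComp 0 cs i.toNat) := by
  have hfold : (PySem.List.pyRange 0 n i).foldl
      (fun st j => pvStepA st (PySem.List.slice cs (some j) (some (j + i))))
      (0, 0, ([] : List Char))
      = ((PySem.List.pyRange 0 n i).map
          (fun j => PySem.List.slice cs (some j) (some (j + i)))).foldl pvStepA
        (0, 0, ([] : List Char)) := by rw [List.foldl_map]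
  have hne : ∀ x ∈ (PySem.List.pyRange 0 n i).map
      (fun j => PySem.List.slice cs (some j) (some (j + i))), x ≠ [] := by
    intro x hx
    rcases List.mem_map.1 hx with ⟨j, hj, rfl⟩
    rcases (PySem.List.mem_pyRange_iff_of_pos (by omega) j).1 hj with ⟨h0, hlt, -⟩
    have hlen : 0 < (PySem.List.slice cs (some j) (some (j + i))).length := by
      rw [PySem.List.slice_toNat cs h0 (show (0:Int) ≤ j + i by omega)]
      simp only [List.length_take, List.length_drop]
      omega
    exact List.length_pos_iff.1 hlen
  rw [hfold, pvInner _ hne]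
  subst hn
  rw [pvRange_chunks cs i h1, pvComp_eq_totalB cs i.toNat (by omega) 0, zero_add]
  omega

-- ===== VERDICT (by name: the statement is the Claim_ definition above) =====
theorem solution_spec : Claim_equal_solution := by
  intro s _
  show solution s = solution_alt s
  unfold solution solution_alt
  apply PySem.List.foldl_congr_mem
  intro acc i hi
  have hi1 : 1 ≤ i := (PySem.List.mem_pyRange_one.1 hi).1
  exact pvBody s.toList (PySem.Str.len s) acc i hi1 (PySem.Str.len_eq s)
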